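-- pv_equiv track=rewrite | github.com/bunshi15/Bridgley | app/core/bots/moving_bot_v1/geo.py | _same_metro
-- ===== SOURCE A (Python) =====
-- METRO_CLUSTERS: dict[str, set[int]] = {
--     "gush_dan": {51, 52, 53},        # Tel Aviv, Ramat Gan, Holon
--     "haifa_krayot": {31},             # Haifa + Krayot
--     "jerusalem_ring": {11},           # Jerusalem
--     "beer_sheva_area": {62},          # Beer Sheva (Eilat excluded below)
-- }
--
-- EILAT_CODE = 2600
--
-- def _same_metro(region_a: int, region_b: int, code_a: int, code_b: int) -> bool:
--     """Check if two localities are in the same metro cluster.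
--
--     Eilat (code 2600) is excluded from the Beer Sheva metro area.
--     """
--     for _cluster_name, region_codes in METRO_CLUSTERS.items():
--         if region_a in region_codes and region_b in region_codes:
--             # Beer Sheva cluster: exclude Eilat
--             if _cluster_name == "beer_sheva_area":
--                 if code_a == EILAT_CODE or code_b == EILAT_CODE:
--                     return False
--             return True
--     return False
-- ===== SOURCE B (Python) =====
-- EILAT_CODE = 2600
--
-- def _same_metro(region_a: int, region_b: int, code_a: int, code_b: int) -> bool:
--     """Closed-form check, no cluster table.
--
--     gush_dan is the only multi-member cluster and its codes are the
--     contiguous range 51..53; every other cluster (31, 11, 62) is a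
--     singleton, so sharing one of those clusters means region_a == region_b.
--     Eilat is excluded from the Beer Sheva (62) cluster.
--     """
--     if 51 <= region_a <= 53 and 51 <= region_b <= 53:
--         return True
--     if region_a != region_b or region_a not in (11, 31, 62):
--         return False
--     return region_a != 62 or EILAT_CODE not in (code_a, code_b)
-- ===== Notes on version B (the rewrite author's own statement) =====
-- stated objective: simpler
-- what changed: Drops the cluster table and its membership scan entirely: a closed-form arithmetic test (range check 51..53 for the only multi-member cluster, region equality for the singleton clusters, Eilat guard only at region 62).
import Mathlib
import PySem

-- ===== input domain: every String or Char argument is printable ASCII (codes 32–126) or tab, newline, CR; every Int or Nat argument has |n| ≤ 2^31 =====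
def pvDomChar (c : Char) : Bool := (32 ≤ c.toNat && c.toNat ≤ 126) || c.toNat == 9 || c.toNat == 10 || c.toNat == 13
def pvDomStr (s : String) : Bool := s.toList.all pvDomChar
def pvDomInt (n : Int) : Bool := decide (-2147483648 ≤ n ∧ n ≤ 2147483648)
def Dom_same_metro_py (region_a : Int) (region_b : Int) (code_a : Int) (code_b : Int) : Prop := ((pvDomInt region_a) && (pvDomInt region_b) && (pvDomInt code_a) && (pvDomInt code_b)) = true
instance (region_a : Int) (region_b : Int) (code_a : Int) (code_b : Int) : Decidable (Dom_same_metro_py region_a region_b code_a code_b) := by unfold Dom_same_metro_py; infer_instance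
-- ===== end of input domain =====

-- B drops the cluster table: a closed-form arithmetic test (range 51..53, then region equality
-- for the singleton clusters, Eilat guard only at 62) replaces A's per-cluster membership scan.

-- ===== PORT A =====
def metroClusters : List (String × PySem.Set Int) :=
  [("gush_dan", PySem.Set.ofList [51, 52, 53]),
   ("haifa_krayot", PySem.Set.ofList [31]),
   ("jerusalem_ring", PySem.Set.ofList [11]),
   ("beer_sheva_area", PySem.Set.ofList [62])]

def eilatCode : Int := 2600

-- the for-loop of A with its early returns
def sameMetroLoop (region_a region_b code_a code_b : Int) : List (String × PySem.Set Int) → Bool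
  | [] => false
  | (clusterName, regionCodes) :: rest =>
    if PySem.Set.contains regionCodes region_a && PySem.Set.contains regionCodes region_b then
      if clusterName == "beer_sheva_area" then
        if code_a == eilatCode || code_b == eilatCode then false
        else true
      else true
    else sameMetroLoop region_a region_b code_a code_b rest

def same_metro_py (region_a : Int) (region_b : Int) (code_a : Int) (code_b : Int) : Bool :=
  sameMetroLoop region_a region_b code_a code_b metroClusters

-- ===== PORT B =====
def same_metro_py_alt (region_a : Int) (region_b : Int) (code_a : Int) (code_b : Int) : Bool :=
  if 51 ≤ region_a ∧ region_a ≤ 53 ∧ 51 ≤ region_b ∧ region_b ≤ 53 then true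
  else if region_a ≠ region_b ∨ ¬ (region_a = 11 ∨ region_a = 31 ∨ region_a = 62) then false
  else decide (region_a ≠ 62) || ! (decide (code_a = eilatCode) || decide (code_b = eilatCode))

-- ===== PRECONDITION & SPEC =====
def Spec_same_metro_py (region_a : Int) (region_b : Int) (code_a : Int) (code_b : Int) (out : Bool) : Prop := out = same_metro_py_alt region_a region_b code_a code_b
instance (region_a : Int) (region_b : Int) (code_a : Int) (code_b : Int) (out : Bool) : Decidable (Spec_same_metro_py region_a region_b code_a code_b out) := by unfold Spec_same_metro_py; infer_instance

-- ===== CLAIM (what is proved, stated in full; the proofs are below) =====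
def Claim_equal_same_metro_py : Prop := ∀ (region_a : Int) (region_b : Int) (code_a : Int) (code_b : Int), Dom_same_metro_py region_a region_b code_a code_b → Spec_same_metro_py region_a region_b code_a code_b (same_metro_py region_a region_b code_a code_b)

-- ===== LEMMAS AND PROOFS =====
theorem contains3 (a b c r : Int) : PySem.Set.contains ([a,b,c] : List Int) r
    = (decide (r = a) || decide (r = b) || decide (r = c)) := by
  simp [PySem.Set.contains, Bool.or_assoc]

theorem contains1 (a r : Int) : PySem.Set.contains ([a] : List Int) r = decide (r = a) := by
  simp [PySem.Set.contains]

theorem ofl3 : PySem.Set.ofList ([51,52,53] : List Int) = [51,52,53] := by decide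
theorem ofl31 : PySem.Set.ofList ([31] : List Int) = [31] := by decide
theorem ofl11 : PySem.Set.ofList ([11] : List Int) = [11] := by decide
theorem ofl62 : PySem.Set.ofList ([62] : List Int) = [62] := by decide

theorem same_metro_key (ra rb ca cb : Int) :
    same_metro_py ra rb ca cb = same_metro_py_alt ra rb ca cb := by
  unfold same_metro_py same_metro_py_alt metroClusters
  simp only [sameMetroLoop, ofl3, ofl31, ofl11, ofl62, contains3, contains1, eilatCode,
    Bool.and_eq_true, Bool.or_eq_true, decide_eq_true_eq, beq_iff_eq, String.reduceEq,
    if_true, if_false]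
  by_cases p1 : ((ra = 51 ∨ ra = 52) ∨ ra = 53) ∧ ((rb = 51 ∨ rb = 52) ∨ rb = 53)
  · rw [if_pos p1, if_pos (show 51 ≤ ra ∧ ra ≤ 53 ∧ 51 ≤ rb ∧ rb ≤ 53 by omega)]
  · rw [if_neg p1, if_neg (show ¬(51 ≤ ra ∧ ra ≤ 53 ∧ 51 ≤ rb ∧ rb ≤ 53) by omega)]
    by_cases p2 : ra = 31 ∧ rb = 31
    · rw [if_pos p2, if_neg (show ¬(ra ≠ rb ∨ ¬(ra = 11 ∨ ra = 31 ∨ ra = 62)) by omega)]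
      obtain ⟨h, _⟩ := p2; subst h; simp
    · rw [if_neg p2]
      by_cases p3 : ra = 11 ∧ rb = 11
      · rw [if_pos p3, if_neg (show ¬(ra ≠ rb ∨ ¬(ra = 11 ∨ ra = 31 ∨ ra = 62)) by omega)]
        obtain ⟨h, _⟩ := p3; subst h; simp
      · rw [if_neg p3]
        by_cases p4 : ra = 62 ∧ rb = 62
        · rw [if_pos p4, if_neg (show ¬(ra ≠ rb ∨ ¬(ra = 11 ∨ ra = 31 ∨ ra = 62)) by omega)]
          obtain ⟨h, _⟩ := p4; subst h
          by_cases he : ca = 2600 ∨ cb = 2600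
          · rw [if_pos he]; rcases he with h | h <;> subst h <;> simp
          · rw [if_neg he]; push Not at he; simp [he.1, he.2]
        · rw [if_neg p4, if_pos (show ra ≠ rb ∨ ¬(ra = 11 ∨ ra = 31 ∨ ra = 62) by omega)]

-- ===== VERDICT (by name: the statement is the Claim_ definition above) =====
theorem same_metro_py_spec : Claim_equal_same_metro_py := by
  intro ra rb ca cb _
  unfold Spec_same_metro_py
  exact same_metro_key ra rb ca cb
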